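-- pv_equiv track=rewrite | github.com/Nixon-Aguado/Feature-Extraction-and-Image-Processing-Book-Examples | ExamplesPython_3.6/Modules/ImagePropertiesUtilities.py | peakDetectorVector
-- ===== SOURCE A (Python) =====
-- def peakDetectorVector(image, peakThreshold, suppWindow = 3):
--     peaks = []
--
--     size = len(image)
--     for x in range(0, size):
--         if image[x] > peakThreshold:
--             peak = True
--             for wx in range(x-suppWindow, x+suppWindow+1):
--                 if wx>=0 and wx<size and image[x] < image[wx]:
--                     peak = False
--             if peak:
--                 peaks.append(x)
--     return peaks
-- ===== SOURCE B (Python) =====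
-- def peakDetectorVector(image, peakThreshold, suppWindow = 3):
--     # O(n) monotonic-deque sliding-window maximum instead of A's per-pixel window scan
--     n = len(image)
--     peaks = []
--     dq = []      # indices whose values strictly decrease from dq[head] onwards
--     head = 0     # dq[head:] is the live deque (front popped by advancing head)
--     nxt = 0      # next index to be inserted into the deque
--     for x in range(n):
--         hi = x + suppWindow
--         while nxt <= hi and nxt < n:
--             v = image[nxt]
--             while len(dq) > head and image[dq[-1]] <= v:
--                 dq.pop()
--             dq.append(nxt)
--             nxt += 1
--         while head < len(dq) and dq[head] < x - suppWindow:
--             head += 1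
--         if image[x] > peakThreshold and (head >= len(dq) or image[dq[head]] <= image[x]):
--             peaks.append(x)
--     return peaks
-- ===== Notes on version B (the rewrite author's own statement) =====
-- stated objective: faster
-- what changed: replaces A's per-index rescan of the whole 2w+1 window with a single-pass monotonic-deque sliding-window maximum (each index enters and leaves the deque once)
import Mathlib
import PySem

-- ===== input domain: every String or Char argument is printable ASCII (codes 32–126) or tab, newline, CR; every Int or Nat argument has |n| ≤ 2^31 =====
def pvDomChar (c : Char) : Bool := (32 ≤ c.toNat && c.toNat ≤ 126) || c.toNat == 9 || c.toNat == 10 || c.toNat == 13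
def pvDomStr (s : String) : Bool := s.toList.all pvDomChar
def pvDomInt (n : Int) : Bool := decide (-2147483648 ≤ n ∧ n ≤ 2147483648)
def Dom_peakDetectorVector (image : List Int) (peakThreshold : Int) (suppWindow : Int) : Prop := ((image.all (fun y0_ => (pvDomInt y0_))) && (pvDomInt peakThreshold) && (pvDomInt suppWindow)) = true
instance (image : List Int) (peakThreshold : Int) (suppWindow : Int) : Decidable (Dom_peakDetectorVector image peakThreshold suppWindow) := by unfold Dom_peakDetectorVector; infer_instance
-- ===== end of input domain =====

-- B replaces A's per-index window rescan by a one-pass monotonic-deque sliding-window maximum (objective: faster).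

-- ===== PORT A =====
def peakDetectorVector (image : List Int) (peakThreshold : Int) (suppWindow : Int) : List Int :=
  let size : Int := image.length
  (PySem.List.pyRange 0 size 1).foldl (fun peaks x =>
    if PySem.List.pyGetD image x 0 > peakThreshold then
      let peak := (PySem.List.pyRange (x - suppWindow) (x + suppWindow + 1) 1).foldl
        (fun peak wx =>
          if wx ≥ 0 ∧ wx < size ∧ PySem.List.pyGetD image x 0 < PySem.List.pyGetD image wx 0 then
            false
          else peak) true
      if peak then peaks ++ [x] else peaks
    else peaks) []

-- ===== PORT B =====
-- inner `while len(dq) > head and image[dq[-1]] <= v: dq.pop()`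
def pvPopBack (image : List Int) (dq : List Int) (head : Nat) (v : Int) : List Int :=
  if _h : head < dq.length ∧ PySem.List.pyGetD image (PySem.List.pyGetD dq (-1) 0) 0 ≤ v then
    pvPopBack image dq.dropLast head v
  else dq
termination_by dq.length
decreasing_by
  simp only [List.length_dropLast]
  omega

-- `while nxt <= hi and nxt < n: … dq.append(nxt); nxt += 1`
def pvPush (image : List Int) (n : Int) (hi : Int) (dq : List Int) (head : Nat) (nxt : Int) :
    List Int × Int :=
  if h : nxt ≤ hi ∧ nxt < n then
    let v := PySem.List.pyGetD image nxt 0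
    pvPush image n hi (pvPopBack image dq head v ++ [nxt]) head (nxt + 1)
  else (dq, nxt)
termination_by (min (hi + 1) n - nxt).toNat
decreasing_by omega

-- `while head < len(dq) and dq[head] < x - suppWindow: head += 1`
def pvEvict (dq : List Int) (head : Nat) (lo : Int) : Nat :=
  if h : head < dq.length ∧ dq.getD head 0 < lo then pvEvict dq (head + 1) lo else head
termination_by dq.length - head
decreasing_by omega

def peakDetectorVector_alt (image : List Int) (peakThreshold : Int) (suppWindow : Int) : List Int :=
  let n : Int := image.length
  ((PySem.List.pyRange 0 n 1).foldl (fun s x =>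
      let dqnxt := pvPush image n (x + suppWindow) s.2.1 s.2.2.1 s.2.2.2
      let head := pvEvict dqnxt.1 s.2.2.1 (x - suppWindow)
      let peaks :=
        if PySem.List.pyGetD image x 0 > peakThreshold ∧
            (head ≥ dqnxt.1.length ∨
              PySem.List.pyGetD image (dqnxt.1.getD head 0) 0 ≤ PySem.List.pyGetD image x 0) then
          s.1 ++ [x]
        else s.1
      (peaks, dqnxt.1, head, dqnxt.2))
    (([] : List Int), ([] : List Int), (0 : Nat), (0 : Int))).1

-- ===== PRECONDITION & SPEC =====
def Spec_peakDetectorVector (image : List Int) (peakThreshold : Int) (suppWindow : Int) (out : List Int) : Prop := out = peakDetectorVector_alt image peakThreshold suppWindow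
instance (image : List Int) (peakThreshold : Int) (suppWindow : Int) (out : List Int) : Decidable (Spec_peakDetectorVector image peakThreshold suppWindow out) := by unfold Spec_peakDetectorVector; infer_instance

-- ===== CLAIM (what is proved, stated in full; the proofs are below) =====
def Claim_equal_peakDetectorVector : Prop := ∀ (image : List Int) (peakThreshold : Int) (suppWindow : Int), Dom_peakDetectorVector image peakThreshold suppWindow → Spec_peakDetectorVector image peakThreshold suppWindow (peakDetectorVector image peakThreshold suppWindow)

-- ===== LEMMAS AND PROOFS =====

-- proof-only abbreviations
def pvImg (image : List Int) (j : Int) : Int := PySem.List.pyGetD image j 0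

-- j is a "suffix maximum" of image on the index interval (j, m): everything after it up to m is strictly smaller
def pvGood (image : List Int) (m j : Int) : Bool :=
  (PySem.List.pyRange (j + 1) m 1).all (fun k => decide (pvImg image k < pvImg image j))

-- the indices the monotonic deque would hold after all of [0, m) has been pushed
def pvSmax (image : List Int) (m : Int) : List Int :=
  (PySem.List.pyRange 0 m 1).filter (fun j => pvGood image m j)

-- "no in-range index of the window around x carries a larger value than x"
def pvWin (image : List Int) (w x : Int) : Prop :=
  ∀ wx : Int, x - w ≤ wx → wx < x + w + 1 → 0 ≤ wx → wx < (image.length : Int) →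
    pvImg image wx ≤ pvImg image x

-- A's per-index decision as a Bool predicate
def pvPA (image : List Int) (thr w : Int) (x : Int) : Bool :=
  decide (PySem.List.pyGetD image x 0 > thr) &&
  !((PySem.List.pyRange (x - w) (x + w + 1) 1).any (fun wx =>
      decide (wx ≥ 0 ∧ wx < (image.length : Int) ∧
        PySem.List.pyGetD image x 0 < PySem.List.pyGetD image wx 0)))

lemma pvGood_iff (image : List Int) (m j : Int) :
    pvGood image m j = true ↔ ∀ k : Int, j < k → k < m → pvImg image k < pvImg image j := by
  simp only [pvGood, List.all_eq_true, PySem.List.mem_pyRange_one, decide_eq_true_eq]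
  constructor
  · intro h k h1 h2; exact h k ⟨by omega, h2⟩
  · intro h k hk; exact h k (by omega) hk.2

lemma pvMem_smax (image : List Int) (m j : Int) :
    j ∈ pvSmax image m ↔ 0 ≤ j ∧ j < m ∧ pvGood image m j = true := by
  simp [pvSmax, List.mem_filter, PySem.List.mem_pyRange_one, and_assoc]

lemma pvSmax_sorted (image : List Int) (m : Int) : (pvSmax image m).Pairwise (· < ·) :=
  List.Pairwise.filter _ (PySem.List.pairwise_lt_pyRange_one 0 m)

lemma pvSmax_chain (image : List Int) {m a b : Int} (ha : a ∈ pvSmax image m)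
    (hb : b ∈ pvSmax image m) (hab : a < b) : pvImg image b < pvImg image a := by
  rcases (pvMem_smax image m a).1 ha with ⟨_, _, hg⟩
  rcases (pvMem_smax image m b).1 hb with ⟨_, hbm, _⟩
  exact (pvGood_iff image m a).1 hg b hab hbm

lemma pvSmax_imgPairwise (image : List Int) (m : Int) :
    (pvSmax image m).Pairwise (fun p q => pvImg image q < pvImg image p) :=
  List.Pairwise.imp_of_mem (fun ha hb hr => pvSmax_chain image ha hb hr) (pvSmax_sorted image m)

lemma pvSmax_zero (image : List Int) : pvSmax image 0 = [] := by
  simp [pvSmax, PySem.List.pyRange_one_eq_nil (le_refl (0 : Int))]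

lemma pvSmax_succ (image : List Int) {m : Int} (h : 0 ≤ m) :
    pvSmax image (m + 1) =
      (pvSmax image m).filter (fun j => decide (pvImg image m < pvImg image j)) ++ [m] := by
  unfold pvSmax
  rw [PySem.List.pyRange_one_succ_right h, List.filter_append, List.filter_filter]
  congr 1
  · apply List.filter_congr
    intro j hj
    rw [PySem.List.mem_pyRange_one] at hj
    unfold pvGood
    rw [PySem.List.pyRange_one_succ_right (by omega : j + 1 ≤ m), List.all_append]
    simp [Bool.and_comm]
  · have : pvGood image (m + 1) m = true := by
      unfold pvGood
      rw [PySem.List.pyRange_one_eq_nil (le_refl (m + 1))]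
      rfl
    simp [this]

lemma pvExists_good (image : List Int) : ∀ (k : Nat) (m j : Int), (m - j).toNat ≤ k → 0 ≤ j → j < m →
    ∃ g, j ≤ g ∧ g < m ∧ pvGood image m g = true ∧ pvImg image j ≤ pvImg image g := by
  intro k
  induction k with
  | zero => intro m j hk h0 hm; omega
  | succ k ih =>
    intro m j hk h0 hm
    by_cases hg : pvGood image m j = true
    · exact ⟨j, le_refl _, hm, hg, le_refl _⟩
    · rw [pvGood_iff] at hg
      push Not at hg
      rcases hg with ⟨k0, h1, h2, h3⟩
      rcases ih m k0 (by omega) (by omega) h2 with ⟨g, hg1, hg2, hg3, hg4⟩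
      exact ⟨g, by omega, hg2, hg3, le_trans h3 hg4⟩

lemma pvPopBack_id (image : List Int) (t : List Int) (v : Int) :
    pvPopBack image t t.length v = t := by
  rw [pvPopBack]
  rw [dif_neg]
  rintro ⟨h1, _⟩
  omega

lemma pvPopBack_spec (image : List Int) (v : Int) : ∀ (k : Nat) (a t : List Int), a.length ≤ k →
    a.Pairwise (fun p q => pvImg image q < pvImg image p) →
    pvPopBack image (t ++ a) t.length v = t ++ a.filter (fun j => decide (v < pvImg image j)) := by
  intro k
  induction k with
  | zero =>
    intro a t hk _
    have ha : a = [] := by cases a <;> simp_all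
    subst ha
    simp [pvPopBack_id]
  | succ k ih =>
    intro a t hk hp
    by_cases ha : a = []
    · subst ha; simp [pvPopBack_id]
    · have hdecomp : t ++ a = (t ++ a.dropLast) ++ [a.getLast ha] := by
        rw [List.append_assoc, List.dropLast_append_getLast ha]
      have hneg : PySem.List.pyGetD (t ++ a) (-1) 0 = a.getLast ha := by
        rw [hdecomp]; exact PySem.List.pyGetD_neg_one_append_singleton _ _ _
      have hlen : t.length < (t ++ a).length := by
        have hpos : 0 < a.length := List.length_pos_iff.2 ha
        simp only [List.length_append]
        omega
      by_cases hv : pvImg image (a.getLast ha) ≤ v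
      · rw [pvPopBack, dif_pos ⟨hlen, by rw [hneg]; exact hv⟩]
        rw [List.dropLast_append_of_ne_nil ha]
        rw [ih a.dropLast t (by have h := @List.length_dropLast _ a; omega)
          (List.Pairwise.sublist (List.dropLast_sublist a) hp)]
        congr 1
        conv_rhs => rw [← List.dropLast_append_getLast ha]
        rw [List.filter_append]
        have : decide (v < pvImg image (a.getLast ha)) = false := by
          simp; omega
        simp [this]
      · rw [pvPopBack, dif_neg]
        · have hall : ∀ p ∈ a, decide (v < pvImg image p) = true := by
            intro p hp2
            have hmem : p ∈ a.dropLast ++ [a.getLast ha] := by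
              rw [List.dropLast_append_getLast ha]; exact hp2
            have hpair : (a.dropLast ++ [a.getLast ha]).Pairwise
                (fun p q => pvImg image q < pvImg image p) := by
              rw [List.dropLast_append_getLast ha]; exact hp
            rcases List.mem_append.1 hmem with hmem | hmem
            · have := (List.pairwise_append.1 hpair).2.2 p hmem (a.getLast ha) (by simp)
              simp; omega
            · simp at hmem
              subst hmem
              simp; omega
          rw [List.filter_eq_self.2 hall]
        · rintro ⟨_, h2⟩
          rw [hneg] at h2
          exact hv h2

lemma pvEvict_eq : ∀ (a t : List Int) (lo : Int),
    pvEvict (t ++ a) t.length lo = t.length + (a.takeWhile (fun j => decide (j < lo))).length := by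
  intro a
  induction a with
  | nil =>
    intro t lo
    rw [pvEvict, dif_neg]
    · simp
    · rintro ⟨h1, _⟩; simp at h1
  | cons j rest ih =>
    intro t lo
    have hget : (t ++ j :: rest).getD t.length 0 = j := by
      rw [List.getD_eq_getElem?_getD, List.getElem?_append_right (le_refl _)]
      simp
    by_cases hj : j < lo
    · rw [pvEvict, dif_pos ⟨by simp, by rw [hget]; exact hj⟩]
      have h1 : t ++ j :: rest = (t ++ [j]) ++ rest := by simp
      have h2 : t.length + 1 = (t ++ [j]).length := by simp
      rw [h1, h2, ih (t ++ [j]) lo]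
      rw [List.takeWhile_cons, if_pos (by simpa using hj)]
      simp
      omega
    · rw [pvEvict, dif_neg (by rintro ⟨_, h2⟩; rw [hget] at h2; exact hj h2)]
      rw [List.takeWhile_cons, if_neg (by simpa using hj)]
      simp

lemma pvDropWhile_filter : ∀ (a : List Int) (lo : Int), a.Pairwise (· < ·) →
    a.dropWhile (fun j => decide (j < lo)) = a.filter (fun j => decide (lo ≤ j)) := by
  intro a
  induction a with
  | nil => intro lo _; rfl
  | cons j rest ih =>
    intro lo hp
    rw [List.dropWhile_cons]
    by_cases hj : j < lo
    · rw [if_pos (by simpa using hj), List.filter_cons, if_neg (by simp; omega)]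
      exact ih lo (List.pairwise_cons.1 hp).2
    · rw [if_neg (by simpa using hj)]
      have hall : ∀ p ∈ j :: rest, decide (lo ≤ p) = true := by
        intro p hp2
        rcases List.mem_cons.1 hp2 with h | h
        · subst h; simp; omega
        · have := List.rel_of_pairwise_cons hp h
          simp; omega
      rw [List.filter_eq_self.2 hall]

lemma pvPush_spec (image : List Int) (hi : Int) : ∀ (k : Nat) (t : List Int) (nxt b : Int),
    (min (hi + 1) (image.length : Int) - nxt).toNat ≤ k → 0 ≤ nxt → nxt ≤ (image.length : Int) →
    b ≤ nxt →
    pvPush image (image.length : Int) hi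
        (t ++ (pvSmax image nxt).filter (fun j => decide (b ≤ j))) t.length nxt
      = (t ++ (pvSmax image (max nxt (min (hi + 1) (image.length : Int)))).filter
            (fun j => decide (b ≤ j)),
         max nxt (min (hi + 1) (image.length : Int))) := by
  intro k
  induction k with
  | zero =>
    intro t nxt b hk h0 h1 hb
    have hstop : ¬(nxt ≤ hi ∧ nxt < (image.length : Int)) := by omega
    rw [pvPush, dif_neg hstop]
    have hmax : max nxt (min (hi + 1) (image.length : Int)) = nxt := by omega
    rw [hmax]
  | succ k ih =>
    intro t nxt b hk h0 h1 hb
    by_cases hc : nxt ≤ hi ∧ nxt < (image.length : Int)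
    · rw [pvPush, dif_pos hc]
      dsimp only
      have hpair : ((pvSmax image nxt).filter (fun j => decide (b ≤ j))).Pairwise
          (fun p q => pvImg image q < pvImg image p) :=
        List.Pairwise.filter _ (pvSmax_imgPairwise image nxt)
      rw [pvPopBack_spec image _ ((pvSmax image nxt).filter (fun j => decide (b ≤ j))).length
        _ t (le_refl _) hpair]
      have hnew : ((pvSmax image nxt).filter (fun j => decide (b ≤ j))).filter
            (fun j => decide (PySem.List.pyGetD image nxt 0 < pvImg image j)) ++ [nxt]
          = (pvSmax image (nxt + 1)).filter (fun j => decide (b ≤ j)) := by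
        rw [pvSmax_succ image h0, List.filter_append, List.filter_filter, List.filter_filter]
        congr 1
        · apply List.filter_congr
          intro j _
          unfold pvImg
          exact Bool.and_comm _ _
        · simp [hb]
      rw [List.append_assoc, hnew]
      rw [ih t (nxt + 1) b (by omega) (by omega) (by omega) (by omega)]
      have hmax : max (nxt + 1) (min (hi + 1) (image.length : Int))
          = max nxt (min (hi + 1) (image.length : Int)) := by omega
      rw [hmax]
    · rw [pvPush, dif_neg hc]
      have hmax : max nxt (min (hi + 1) (image.length : Int)) = nxt := by omega
      rw [hmax]

lemma pvFilter_min (image : List Int) (m b : Int) :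
    (pvSmax image m).filter (fun j => decide (b ≤ j))
      = (pvSmax image m).filter (fun j => decide (min b m ≤ j)) := by
  apply List.filter_congr
  intro j hj
  have := (pvMem_smax image m j).1 hj
  rw [decide_eq_decide]
  omega

lemma pvCond_iff (image : List Int) (w x : Int) :
    (((pvSmax image (max 0 (min (x + w + 1) (image.length : Int)))).filter
        (fun j => decide (x - w ≤ j)) = []) ∨
      ∃ f tl, (pvSmax image (max 0 (min (x + w + 1) (image.length : Int)))).filter
          (fun j => decide (x - w ≤ j)) = f :: tl ∧ pvImg image f ≤ pvImg image x)
    ↔ pvWin image w x := by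
  set n : Int := (image.length : Int) with hn
  set N : Int := max 0 (min (x + w + 1) n) with hN
  set act := (pvSmax image N).filter (fun j => decide (x - w ≤ j)) with hact
  constructor
  · intro h wx hw1 hw2 hw3 hw4
    have hwN : wx < N := by omega
    rcases pvExists_good image (N - wx).toNat N wx (le_refl _) hw3 hwN with ⟨g, hg1, hg2, hg3, hg4⟩
    have hgs : g ∈ pvSmax image N := (pvMem_smax image N g).2 ⟨by omega, hg2, hg3⟩
    have hgact : g ∈ act := by
      rw [hact, List.mem_filter]
      exact ⟨hgs, by simp; omega⟩
    rcases h with h | ⟨f, tl, hft, hfx⟩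
    · rw [h] at hgact; simp at hgact
    · have hfact : f ∈ act := by rw [hft]; simp
      have hfs : f ∈ pvSmax image N := (List.mem_filter.1 hfact).1
      rcases List.mem_cons.1 (hft ▸ hgact) with hgf | hgtl
      · subst hgf; linarith
      · have hsort : act.Pairwise (· < ·) := List.Pairwise.filter _ (pvSmax_sorted image N)
        rw [hft] at hsort
        have hfg : f < g := List.rel_of_pairwise_cons hsort hgtl
        have := pvSmax_chain image hfs hgs hfg
        linarith
  · intro h
    cases hact2 : act with
    | nil => exact Or.inl rfl
    | cons f tl =>
      right
      refine ⟨f, tl, rfl, ?_⟩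
      have hfact : f ∈ act := by rw [hact2]; simp
      have hfs : f ∈ pvSmax image N := (List.mem_filter.1 hfact).1
      have hfw : x - w ≤ f := by
        have := (List.mem_filter.1 hfact).2
        simpa using this
      rcases (pvMem_smax image N f).1 hfs with ⟨hf0, hfN, _⟩
      exact h f hfw (by omega) hf0 (by omega)

lemma pvPA_iff (image : List Int) (thr w x : Int) :
    pvPA image thr w x = true ↔
      (PySem.List.pyGetD image x 0 > thr ∧ pvWin image w x) := by
  unfold pvPA
  rw [Bool.and_eq_true, decide_eq_true_eq, Bool.not_eq_true', List.any_eq_false]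
  apply and_congr_right'
  constructor
  · intro h wx h1 h2 h3 h4
    have := h wx ((PySem.List.mem_pyRange_one).2 ⟨h1, h2⟩)
    simp only [decide_eq_true_eq] at this
    push Not at this
    unfold pvImg
    exact this h3 h4
  · intro h wx hmem
    rw [PySem.List.mem_pyRange_one] at hmem
    simp only [decide_eq_true_eq]
    rintro ⟨hh1, hh2, hh3⟩
    have := h wx hmem.1 hmem.2 hh1 hh2
    unfold pvImg at this
    omega

lemma pvInner_eq (image : List Int) (x : Int) (l : List Int) :
    l.foldl (fun peak wx =>
        if wx ≥ 0 ∧ wx < (image.length : Int) ∧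
            PySem.List.pyGetD image x 0 < PySem.List.pyGetD image wx 0 then false else peak) true
      = !(l.any (fun wx => decide (wx ≥ 0 ∧ wx < (image.length : Int) ∧
            PySem.List.pyGetD image x 0 < PySem.List.pyGetD image wx 0))) := by
  have hcong : l.foldl (fun peak wx =>
        if wx ≥ 0 ∧ wx < (image.length : Int) ∧
            PySem.List.pyGetD image x 0 < PySem.List.pyGetD image wx 0 then false else peak) true
      = l.foldl (fun peak wx => if (decide (wx ≥ 0 ∧ wx < (image.length : Int) ∧
            PySem.List.pyGetD image x 0 < PySem.List.pyGetD image wx 0)) then false else peak) true :=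
    PySem.List.foldl_congr_mem' _ _ _ _ (by
      intro wx _ acc
      by_cases h : wx ≥ 0 ∧ wx < (image.length : Int) ∧
          PySem.List.pyGetD image x 0 < PySem.List.pyGetD image wx 0 <;> simp [h])
  rw [hcong, PySem.List.foldl_if_false_eq]
  simp

lemma pvA_eq (image : List Int) (thr w : Int) :
    peakDetectorVector image thr w
      = (PySem.List.pyRange 0 (image.length : Int) 1).filter (pvPA image thr w) := by
  unfold peakDetectorVector
  dsimp only
  have hcong : (PySem.List.pyRange 0 (image.length : Int) 1).foldl (fun peaks x =>
        if PySem.List.pyGetD image x 0 > thr then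
          if ((PySem.List.pyRange (x - w) (x + w + 1) 1).foldl (fun peak wx =>
              if wx ≥ 0 ∧ wx < (image.length : Int) ∧
                  PySem.List.pyGetD image x 0 < PySem.List.pyGetD image wx 0 then false
              else peak) true) = true then
            peaks ++ [x]
          else peaks
        else peaks) []
      = (PySem.List.pyRange 0 (image.length : Int) 1).foldl
          (fun peaks x => if pvPA image thr w x then peaks ++ [x] else peaks) [] :=
    PySem.List.foldl_congr_mem' _ _ _ _ (by
      intro x hx acc
      rw [pvInner_eq image x]
      unfold pvPA
      by_cases h1 : PySem.List.pyGetD image x 0 > thr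
      · rw [if_pos h1, decide_eq_true h1, Bool.true_and]
      · rw [if_neg h1, decide_eq_false h1, Bool.false_and]
        simp)
  rw [hcong, PySem.List.foldl_append_if_eq_filter]
  simp

lemma pvStep_eq (image : List Int) (thr w x nxt : Int) (peaks t : List Int)
    (hx0 : 0 ≤ x) (hxn : x < (image.length : Int)) (h0 : 0 ≤ nxt)
    (h1 : nxt ≤ (image.length : Int)) (h2 : nxt ≤ max 0 (min (x + w) (image.length : Int))) :
    ∃ t' : List Int,
      (fun (s : List Int × List Int × Nat × Int) (x : Int) =>
        let dqnxt := pvPush image (image.length : Int) (x + w) s.2.1 s.2.2.1 s.2.2.2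
        let head := pvEvict dqnxt.1 s.2.2.1 (x - w)
        let peaks :=
          if PySem.List.pyGetD image x 0 > thr ∧
              (head ≥ dqnxt.1.length ∨
                PySem.List.pyGetD image (dqnxt.1.getD head 0) 0 ≤ PySem.List.pyGetD image x 0) then
            s.1 ++ [x]
          else s.1
        (peaks, dqnxt.1, head, dqnxt.2))
        (peaks, t ++ (pvSmax image nxt).filter (fun j => decide (min (x - 1 - w) nxt ≤ j)),
          t.length, nxt) x
      = ((if pvPA image thr w x then peaks ++ [x] else peaks),
          t' ++ (pvSmax image (max 0 (min (x + w + 1) (image.length : Int)))).filter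
            (fun j => decide (min (x - w) (max 0 (min (x + w + 1) (image.length : Int))) ≤ j)),
          t'.length, max 0 (min (x + w + 1) (image.length : Int))) := by
  dsimp only
  set n : Int := (image.length : Int) with hn
  set b := min (x - 1 - w) nxt with hb
  set N := max 0 (min (x + w + 1) n) with hN
  set A' := (pvSmax image N).filter (fun j => decide (b ≤ j)) with hA
  set tw := A'.takeWhile (fun j => decide (j < x - w)) with htw
  set dw := A'.dropWhile (fun j => decide (j < x - w)) with hdw
  have hsplit : A' = tw ++ dw := (List.takeWhile_append_dropWhile).symm
  have hAsort : A'.Pairwise (· < ·) := List.Pairwise.filter _ (pvSmax_sorted image N)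
  have hdwf : dw = (pvSmax image N).filter (fun j => decide (x - w ≤ j)) := by
    rw [hdw, pvDropWhile_filter A' (x - w) hAsort, hA, List.filter_filter]
    refine List.filter_congr ?_
    intro j _
    by_cases hxj : x - w ≤ j
    · have hbj : b ≤ j := by omega
      simp [hxj, hbj]
    · simp [hxj]
  have hdwmin : dw = (pvSmax image N).filter (fun j => decide (min (x - w) N ≤ j)) := by
    rw [hdwf]; exact pvFilter_min image N (x - w)
  have hlenA : A'.length = tw.length + dw.length := by
    rw [hsplit]; simp
  have hgetD : ∀ f tl, dw = f :: tl → (t ++ A').getD (t.length + tw.length) 0 = f := by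
    intro f tl hdwe
    have h5 : t ++ A' = (t ++ tw) ++ (f :: tl) := by rw [hsplit, hdwe]; simp
    rw [h5, List.getD_eq_getElem?_getD,
        List.getElem?_append_right (by simp)]
    simp
  have hempty : (t.length + tw.length ≥ (t ++ A').length) ↔ dw = [] := by
    rw [List.length_append, hlenA]
    constructor
    · intro hgeq
      exact List.length_eq_zero_iff.1 (by omega)
    · intro hdwe
      rw [hdwe]
      simp
  have hcond : (PySem.List.pyGetD image x 0 > thr ∧
        (t.length + tw.length ≥ (t ++ A').length ∨
          PySem.List.pyGetD image ((t ++ A').getD (t.length + tw.length) 0) 0 ≤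
            PySem.List.pyGetD image x 0))
      ↔ pvPA image thr w x = true := by
    rw [pvPA_iff]
    apply and_congr_right'
    rw [← pvCond_iff image w x, ← hn, ← hN, ← hdwf]
    constructor
    · intro hcase
      by_cases hdwe : dw = []
      · exact Or.inl hdwe
      · right
        obtain ⟨f, tl, hfl⟩ : ∃ f tl, dw = f :: tl := by
          cases hh : dw with
          | nil => exact absurd hh hdwe
          | cons f tl => exact ⟨f, tl, rfl⟩
        refine ⟨f, tl, hfl, ?_⟩
        rcases hcase with hcase | hcase
        · exact absurd (hempty.1 hcase) hdwe
        · rw [hgetD f tl hfl] at hcase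
          unfold pvImg
          exact hcase
    · intro hcase
      rcases hcase with hdwe | ⟨f, tl, hfl, hfx⟩
      · exact Or.inl (hempty.2 hdwe)
      · right
        rw [hgetD f tl hfl]
        unfold pvImg at hfx
        exact hfx
  refine ⟨t ++ tw, ?_⟩
  rw [pvPush_spec image (x + w) (min (x + w + 1) n - nxt).toNat t nxt b (le_refl _) h0 h1
      (min_le_right _ _)]
  have hM : max nxt (min (x + w + 1) n) = N := by rw [hN]; omega
  dsimp only
  rw [hM, ← hA, pvEvict_eq A' t (x - w), ← htw]
  simp only [hcond]
  have hc2 : t ++ A' = (t ++ tw) ++ (pvSmax image N).filter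
      (fun j => decide (min (x - w) N ≤ j)) := by
    rw [← hdwmin, hsplit, List.append_assoc]
  have hc3 : t.length + tw.length = (t ++ tw).length := by simp
  rw [hc2, hc3]

lemma pvLoop (image : List Int) (thr w : Int) : ∀ (k : Nat) (x : Int) (peaks t : List Int) (nxt : Int),
    ((image.length : Int) - x).toNat ≤ k → 0 ≤ x → x ≤ (image.length : Int) →
    0 ≤ nxt → nxt ≤ (image.length : Int) → nxt ≤ max 0 (min (x + w) (image.length : Int)) →
    ((PySem.List.pyRange x (image.length : Int) 1).foldl
      (fun (s : List Int × List Int × Nat × Int) (x : Int) =>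
        let dqnxt := pvPush image (image.length : Int) (x + w) s.2.1 s.2.2.1 s.2.2.2
        let head := pvEvict dqnxt.1 s.2.2.1 (x - w)
        let peaks :=
          if PySem.List.pyGetD image x 0 > thr ∧
              (head ≥ dqnxt.1.length ∨
                PySem.List.pyGetD image (dqnxt.1.getD head 0) 0 ≤ PySem.List.pyGetD image x 0) then
            s.1 ++ [x]
          else s.1
        (peaks, dqnxt.1, head, dqnxt.2))
      (peaks, t ++ (pvSmax image nxt).filter (fun j => decide (min (x - 1 - w) nxt ≤ j)),
        t.length, nxt)).1
    = peaks ++ (PySem.List.pyRange x (image.length : Int) 1).filter (pvPA image thr w) := by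
  intro k
  induction k with
  | zero =>
    intro x peaks t nxt hk hx0 hxn h0 h1 h2
    rw [PySem.List.pyRange_one_eq_nil (by omega)]
    simp
  | succ k ih =>
    intro x peaks t nxt hk hx0 hxn h0 h1 h2
    by_cases hlt : x < (image.length : Int)
    · rw [PySem.List.pyRange_one_cons hlt, List.foldl_cons, List.filter_cons]
      dsimp only
      rcases pvStep_eq image thr w x nxt peaks t hx0 hlt h0 h1 h2 with ⟨t', hstep⟩
      dsimp only at hstep
      rw [hstep]
      have harg : x + 1 - 1 - w = x - w := by ring
      have hih := ih (x + 1) (if pvPA image thr w x then peaks ++ [x] else peaks) t'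
        (max 0 (min (x + w + 1) (image.length : Int))) (by omega) (by omega) (by omega)
        (by omega) (by omega) (by omega)
      rw [harg] at hih
      rw [hih]
      cases pvPA image thr w x <;> simp
    · rw [PySem.List.pyRange_one_eq_nil (by omega)]
      simp


-- ===== VERDICT (by name: the statement is the Claim_ definition above) =====
theorem peakDetectorVector_spec : Claim_equal_peakDetectorVector := by
  intro image thr w _
  unfold Spec_peakDetectorVector
  rw [pvA_eq]
  unfold peakDetectorVector_alt
  have h := pvLoop image thr w ((image.length : Int) - 0).toNat 0 [] [] 0 (le_refl _)
    (le_refl _) (Int.natCast_nonneg _) (le_refl _) (Int.natCast_nonneg _) (le_max_left _ _)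
  simp only [pvSmax_zero, List.filter_nil, List.append_nil, List.nil_append,
    List.length_nil] at h
  rw [← h]
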